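-- pv_equiv track=rewrite | github.com/Zsoltsrosi/Rougelike-RPG | map.py | playerindex_col
-- ===== SOURCE A (Python) =====
-- def playerindex_col(board):
--     Y = 0
--     for row in board:
--         for col in row:
--             if col == "X":
--                 return Y
--             else:
--                 Y += 1
--         Y = 0
-- ===== SOURCE B (Python) =====
-- def playerindex_col(board):
--     # Flatten row-major, locate the first "X" once in the flat list,
--     # then recover its column by subtracting row lengths.
--     flat = [c for row in board for c in row]
--     try:
--         i = flat.index("X")
--     except ValueError:
--         return None
--     for row in board:
--         if i < len(row):
--             return i
--         i -= len(row)
-- ===== Notes on version B (the rewrite author's own statement) =====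
-- stated objective: alternative
-- what changed: Instead of a per-row counting scan with a reset, B flattens the board row-major, finds one global index of the first 'X' in the flat list, and recovers the column arithmetically by subtracting row lengths.
import Mathlib
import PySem

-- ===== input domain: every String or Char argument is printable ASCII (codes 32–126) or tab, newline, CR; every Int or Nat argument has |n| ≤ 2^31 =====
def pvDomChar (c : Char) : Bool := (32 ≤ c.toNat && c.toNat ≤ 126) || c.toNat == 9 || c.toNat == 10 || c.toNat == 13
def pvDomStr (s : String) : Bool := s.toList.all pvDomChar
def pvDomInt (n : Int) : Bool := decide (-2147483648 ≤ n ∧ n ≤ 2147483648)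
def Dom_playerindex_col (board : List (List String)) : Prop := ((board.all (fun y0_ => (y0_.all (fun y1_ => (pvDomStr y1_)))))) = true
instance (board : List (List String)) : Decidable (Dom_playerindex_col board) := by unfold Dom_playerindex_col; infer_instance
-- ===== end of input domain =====

-- B flattens the board, finds one global index of the first "X", and recovers the
-- column by subtracting row lengths — replacing A's per-row counting scan; objective: alternative.

-- ===== PORT A =====
-- inner 'for col in row' loop with the running counter Y
def pvA_row (row : List String) (Y : Int) : Option Int :=
  match row with
  | [] => none
  | c :: rest => if c == "X" then some Y else pvA_row rest (Y + 1)

-- outer 'for row in board' loop; Y is reset to 0 after each row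
def pvA_rows (board : List (List String)) : Option Int :=
  match board with
  | [] => none
  | r :: rs =>
    match pvA_row r 0 with
    | some y => some y
    | none => pvA_rows rs

def playerindex_col (board : List (List String)) : Option Int := pvA_rows board

-- ===== PORT B =====
-- 'for row in board: if i < len(row): return i; i -= len(row)' (falls off the end → none)
def pvB_decode (board : List (List String)) (i : Int) : Option Int :=
  match board with
  | [] => none
  | r :: rs => if i < (r.length : Int) then some i else pvB_decode rs (i - r.length)

-- 'flat = [c for row in board for c in row]; i = flat.index("X")' then the decode loop
def playerindex_col_alt (board : List (List String)) : Option Int :=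
  match PySem.List.index? (board.flatMap (fun row => row)) "X" with
  | none => none
  | some i => pvB_decode board (i : Int)

-- ===== PRECONDITION & SPEC =====
def Spec_playerindex_col (board : List (List String)) (out : Option Int) : Prop := out = playerindex_col_alt board
instance (board : List (List String)) (out : Option Int) : Decidable (Spec_playerindex_col board out) := by unfold Spec_playerindex_col; infer_instance

-- ===== CLAIM =====
def Claim_equal_playerindex_col : Prop := ∀ (board : List (List String)), Dom_playerindex_col board → Spec_playerindex_col board (playerindex_col board)

-- ===== LEMMAS AND PROOFS =====
theorem pvA_row_eq_index? (row : List String) (Y : Int) :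
    pvA_row row Y = Option.map (fun (n : Nat) => Y + (n : Int)) (PySem.List.index? row "X") := by
  induction row generalizing Y with
  | nil => simp [pvA_row, PySem.List.index?_eq_idxOf?, List.idxOf?]
  | cons c rest ih =>
    by_cases h : c = "X"
    · subst h
      rw [PySem.List.index?_cons_self]
      simp [pvA_row]
    · rw [pvA_row, PySem.List.index?_cons_of_ne rest h, if_neg (by simpa using h), ih]
      cases PySem.List.index? rest "X" <;> (simp; try ring)

theorem pv_index?_append (l t : List String) :
    PySem.List.index? (l ++ t) "X" =
      match PySem.List.index? l "X" with
      | some j => some j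
      | none => (PySem.List.index? t "X").map (· + l.length) := by
  induction l with
  | nil => simp [PySem.List.index?_eq_idxOf?]
  | cons c rest ih =>
    by_cases h : c = "X"
    · subst h
      rw [PySem.List.index?_cons_self]
      have : ((("X" :: rest) ++ t)) = "X" :: (rest ++ t) := rfl
      rw [this, PySem.List.index?_cons_self]
    · have : ((c :: rest) ++ t) = c :: (rest ++ t) := rfl
      rw [this, PySem.List.index?_cons_of_ne _ h, PySem.List.index?_cons_of_ne _ h, ih]
      cases hr : PySem.List.index? rest "X" with
      | some j => simp
      | none =>
        cases PySem.List.index? t "X" with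
        | none => simp
        | some k => simp; omega

theorem pv_index?_lt_length (l : List String) (j : Nat)
    (h : PySem.List.index? l "X" = some j) : j < l.length := by
  obtain ⟨hk, _, _⟩ := PySem.List.getElem_of_index?_eq_some h
  exact hk

theorem pvA_eq_alt (board : List (List String)) :
    pvA_rows board = playerindex_col_alt board := by
  induction board with
  | nil => rfl
  | cons r rs ih =>
    rw [pvA_rows, pvA_row_eq_index?]
    unfold playerindex_col_alt
    have hflat : ((r :: rs).flatMap (fun row => row)) = r ++ rs.flatMap (fun row => row) := by
      simp
    rw [hflat, pv_index?_append]
    cases hr : PySem.List.index? r "X" with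
    | some j =>
      have hj := pv_index?_lt_length r j hr
      simp [pvB_decode, hj]
    | none =>
      rw [ih]
      unfold playerindex_col_alt
      cases ht : PySem.List.index? (rs.flatMap (fun row => row)) "X" with
      | none => simp
      | some j =>
        have hlt : ¬ ((j + r.length : Nat) : Int) < (r.length : Int) := by push_cast; omega
        simp only [Option.map_some, Option.map_none]
        rw [pvB_decode, if_neg hlt]
        congr 1
        push_cast
        ring

-- ===== VERDICT =====
theorem playerindex_col_spec : Claim_equal_playerindex_col := by
  intro board _
  unfold Spec_playerindex_col playerindex_col
  exact pvA_eq_alt board
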